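-- pv_equiv track=rewrite | github.com/Kumar-laxmi/Algorithms | Python/Cryptography/playfair_cipher.py | digraphPlainText
-- ===== SOURCE A (Python) =====
-- def digraphPlainText(plainText):
--     res = ""
--     i = 0
--     length = len(plainText)
--     while i < length:
--         if i == length-1 or plainText[i] == plainText[i+1]:
--             res += plainText[i]
--             res += 'X'
--             i += 1
--         else:
--             res += plainText[i]
--             res += plainText[i+1]
--             i += 2
--     return res
-- ===== SOURCE B (Python) =====
-- def digraphPlainText(plainText):
--     res = []
--     pending = None
--     for c in plainText:
--         if pending is None:
--             pending = c
--         elif pending == c: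
--             res.append(pending)
--             res.append('X')
--             pending = c
--         else:
--             res.append(pending)
--             res.append(c)
--             pending = None
--     if pending is not None:
--         res.append(pending)
--         res.append('X')
--     return "".join(res)
-- ===== Notes on version B (the rewrite author's own statement) =====
-- stated objective: faster
-- what changed: Replaces A's index-based while loop with variable step, lookahead and quadratic string concatenation by a single for-loop over the characters carrying a one-character pending buffer into a result list joined once at the end.
import Mathlib
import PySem

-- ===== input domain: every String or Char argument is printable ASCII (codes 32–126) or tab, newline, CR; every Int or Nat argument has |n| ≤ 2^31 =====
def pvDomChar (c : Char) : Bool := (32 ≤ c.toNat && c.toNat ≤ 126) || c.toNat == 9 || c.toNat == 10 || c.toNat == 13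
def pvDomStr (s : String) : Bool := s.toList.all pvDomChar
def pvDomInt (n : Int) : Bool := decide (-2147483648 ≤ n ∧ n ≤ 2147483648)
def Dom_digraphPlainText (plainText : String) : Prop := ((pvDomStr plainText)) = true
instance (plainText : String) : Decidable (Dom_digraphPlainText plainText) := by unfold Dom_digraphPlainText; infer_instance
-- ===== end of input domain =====

-- B replaces A's index-based lookahead loop (variable step 1/2) by a single streaming
-- pass carrying a one-character pending buffer; objective: alternative decomposition.

-- ===== PORT A =====
-- A's while loop over index i, accumulating res; all index accesses are in range
-- (i < length, and i+1 < length in the else-branch since i ≠ length-1), so the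
-- dependent accesses s[i] are exactly Python's s[i].
def digraphLoopA (s : List Char) (i : Nat) (res : List Char) : List Char :=
  if h : i < s.length then
    if h1 : i = s.length - 1 then
      digraphLoopA s (i + 1) (res ++ [s[i], 'X'])
    else if s[i] = s[i + 1]'(by omega) then
      digraphLoopA s (i + 1) (res ++ [s[i], 'X'])
    else
      digraphLoopA s (i + 2) (res ++ [s[i], s[i + 1]'(by omega)])
  else res
termination_by s.length - i

def digraphPlainText (plainText : String) : String :=
  String.ofList (digraphLoopA plainText.toList 0 [])

-- ===== PORT B =====
def altStep (st : List Char × Option Char) (c : Char) : List Char × Option Char :=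
  match st.2 with
  | none => (st.1, some c)
  | some p => if p = c then (st.1 ++ [p, 'X'], some c) else (st.1 ++ [p, c], none)

def digraphPlainText_alt (plainText : String) : String :=
  let st := plainText.toList.foldl altStep ([], none)
  match st.2 with
  | none => String.ofList st.1
  | some p => String.ofList (st.1 ++ [p, 'X'])

-- ===== PRECONDITION & SPEC =====
def Spec_digraphPlainText (plainText : String) (out : String) : Prop := out = digraphPlainText_alt plainText
instance (plainText : String) (out : String) : Decidable (Spec_digraphPlainText plainText out) := by unfold Spec_digraphPlainText; infer_instance

-- ===== CLAIM (what is proved, stated in full; the proofs are below) =====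
def Claim_equal_digraphPlainText : Prop := ∀ (plainText : String), Dom_digraphPlainText plainText → Spec_digraphPlainText plainText (digraphPlainText plainText)

-- ===== LEMMAS AND PROOFS =====

-- reference digraph function; both ports are reduced to it
def dig : List Char → List Char
  | [] => []
  | [c] => [c, 'X']
  | c1 :: c2 :: rest =>
      if c1 = c2 then c1 :: 'X' :: dig (c2 :: rest) else c1 :: c2 :: dig rest

theorem digraphLoopA_eq (s : List Char) (i : Nat) (res : List Char) :
    digraphLoopA s i res = res ++ dig (s.drop i) := by
  induction i, res using digraphLoopA.induct s with
  | case1 res h ih =>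
      rw [digraphLoopA, dif_pos h, dif_pos rfl, ih]
      have hd : s.drop (s.length - 1) = [s[s.length - 1]] := by
        rw [List.drop_eq_getElem_cons h]
        have h2 : s.drop (s.length - 1 + 1) = [] := by
          apply List.drop_eq_nil_of_le; omega
        simp [h2]
      have h2 : s.drop (s.length - 1 + 1) = [] := by
        apply List.drop_eq_nil_of_le; omega
      simp [hd, h2, dig]
  | case2 i res h h1 h2 ih =>
      rw [digraphLoopA, dif_pos h, dif_neg h1, if_pos h2, ih]
      have hi1 : i + 1 < s.length := by omega
      rw [List.drop_eq_getElem_cons h, List.drop_eq_getElem_cons hi1]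
      simp [dig, h2]
  | case3 i res h h1 h2 ih =>
      rw [digraphLoopA, dif_pos h, dif_neg h1, if_neg h2, ih]
      have hi1 : i + 1 < s.length := by omega
      rw [List.drop_eq_getElem_cons h, List.drop_eq_getElem_cons hi1]
      simp [dig, h2]
  | case4 i res h =>
      rw [digraphLoopA, dif_neg h]
      have hd : s.drop i = [] := by apply List.drop_eq_nil_of_le; omega
      simp [hd, dig]

def finishB (st : List Char × Option Char) : List Char :=
  match st.2 with
  | none => st.1
  | some p => st.1 ++ [p, 'X']

theorem foldl_altStep_eq (l : List Char) (res : List Char) :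
    finishB (l.foldl altStep (res, none)) = res ++ dig l := by
  induction l using dig.induct generalizing res with
  | case1 => simp [finishB, dig]
  | case2 c => simp [altStep, finishB, dig]
  | case3 c rest ih =>
      have hstep : (c :: c :: rest).foldl altStep (res, none)
          = (c :: rest).foldl altStep (res ++ [c, 'X'], none) := by
        simp [List.foldl, altStep]
      rw [hstep, ih, dig]
      simp
  | case4 c1 c2 rest h ih =>
      have hstep : (c1 :: c2 :: rest).foldl altStep (res, none)
          = rest.foldl altStep (res ++ [c1, c2], none) := by
        simp [List.foldl, altStep, h]
      rw [hstep, ih, dig, if_neg h]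
      simp

-- ===== VERDICT (by name: the statement is the Claim_ definition above) =====
theorem digraphPlainText_spec : Claim_equal_digraphPlainText := by
  intro s _
  unfold Spec_digraphPlainText digraphPlainText digraphPlainText_alt
  have hB := foldl_altStep_eq s.toList []
  have hA := digraphLoopA_eq s.toList 0 []
  simp only [List.drop_zero, List.nil_append] at hA hB
  rw [hA, ← hB]
  unfold finishB
  cases h : (s.toList.foldl altStep ([], none)).2 <;> simp [h]
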